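-- pv_equiv track=rewrite | github.com/ho1ow/flow-sast | phases/2_connect/triage.py | _score_distribution
-- ===== SOURCE A (Python) =====
-- from typing import List
--
-- def _score_distribution(paths: List[dict]) -> dict:
--     dist = {">=10": 0, "8-9": 0, "6-7": 0}
--     for p in paths:
--         s = p.get("score", 0)
--         if s >= 10:
--             dist[">=10"] += 1
--         elif s >= 8:
--             dist["8-9"] += 1
--         else:
--             dist["6-7"] += 1
--     return dist
-- ===== SOURCE B (Python) =====
-- def _score_distribution(paths):
--     scores = [p.get("score", 0) for p in paths]
--     return {
--         ">=10": sum(1 for s in scores if s >= 10),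
--         "8-9": sum(1 for s in scores if 8 <= s < 10),
--         "6-7": sum(1 for s in scores if s < 8),
--     }
-- ===== Notes on version B (the rewrite author's own statement) =====
-- stated objective: alternative
-- what changed: Replaces the single stateful loop over a mutable counter dict by building the score list once and counting each bucket with an independent predicate (>=10, 8<=s<10, s<8), assembling the result dict in one literal.
import Mathlib
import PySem

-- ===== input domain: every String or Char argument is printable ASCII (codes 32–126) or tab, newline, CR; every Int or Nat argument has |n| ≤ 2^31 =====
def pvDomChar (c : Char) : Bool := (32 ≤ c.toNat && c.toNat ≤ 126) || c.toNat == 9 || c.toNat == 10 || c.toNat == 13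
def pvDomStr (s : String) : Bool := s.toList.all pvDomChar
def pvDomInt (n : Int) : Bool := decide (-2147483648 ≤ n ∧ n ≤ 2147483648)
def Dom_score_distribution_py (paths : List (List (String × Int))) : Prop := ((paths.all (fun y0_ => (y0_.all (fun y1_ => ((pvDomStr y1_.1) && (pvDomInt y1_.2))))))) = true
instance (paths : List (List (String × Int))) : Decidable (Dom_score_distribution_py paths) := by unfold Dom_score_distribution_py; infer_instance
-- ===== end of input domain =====

-- B replaces A's single stateful loop over a mutable counter dict by building the score
-- list once and counting each bucket with an independent predicate (alternative decomposition).


-- ===== PORT A =====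
-- p.get("score", 0) on the dict argument (assoc list, unique keys in Python): first match, default 0
def pvScoreGet (p : List (String × Int)) : Int :=
  (PySem.Dict.mk p).getD "score" 0

def score_distribution_py (paths : List (List (String × Int))) : List (String × Int) :=
  (paths.foldl
    (fun dist p =>
      let s := pvScoreGet p
      if s ≥ 10 then dist.modify ">=10" 0 (· + 1)
      else if s ≥ 8 then dist.modify "8-9" 0 (· + 1)
      else dist.modify "6-7" 0 (· + 1))
    (PySem.Dict.mk [(">=10", 0), ("8-9", 0), ("6-7", 0)])).items

-- ===== PORT B =====
def score_distribution_py_alt (paths : List (List (String × Int))) : List (String × Int) :=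
  let scores := paths.map pvScoreGet
  [(">=10", ((scores.filter (fun s => s ≥ 10)).length : Int)),
   ("8-9", ((scores.filter (fun s => 8 ≤ s ∧ s < 10)).length : Int)),
   ("6-7", ((scores.filter (fun s => s < 8)).length : Int))]

-- ===== PRECONDITION & SPEC =====
def Spec_score_distribution_py (paths : List (List (String × Int))) (out : List (String × Int)) : Prop := out = score_distribution_py_alt paths
instance (paths : List (List (String × Int))) (out : List (String × Int)) : Decidable (Spec_score_distribution_py paths out) := by unfold Spec_score_distribution_py; infer_instance

-- ===== CLAIM (what is proved, stated in full; the proofs are below) =====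
def Claim_equal_score_distribution_py : Prop := ∀ (paths : List (List (String × Int))), Dom_score_distribution_py paths → Spec_score_distribution_py paths (score_distribution_py paths)

-- ===== LEMMAS AND PROOFS =====

-- loop invariant for A's fold: starting from counters (a, b, c), the loop adds the three bucket counts
lemma score_loop_invariant (l : List (List (String × Int))) (a b c : Int) :
    (l.foldl
      (fun dist p =>
        let s := pvScoreGet p
        if s ≥ 10 then dist.modify ">=10" 0 (· + 1)
        else if s ≥ 8 then dist.modify "8-9" 0 (· + 1)
        else dist.modify "6-7" 0 (· + 1))
      (PySem.Dict.mk [(">=10", a), ("8-9", b), ("6-7", c)])).items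
    = [(">=10", a + (((l.map pvScoreGet).filter (fun s => s ≥ 10)).length : Int)),
       ("8-9", b + (((l.map pvScoreGet).filter (fun s => 8 ≤ s ∧ s < 10)).length : Int)),
       ("6-7", c + (((l.map pvScoreGet).filter (fun s => s < 8)).length : Int))] := by
  induction l generalizing a b c with
  | nil => simp
  | cons p t ih =>
    simp only [List.foldl_cons, List.map_cons, List.filter_cons]
    by_cases h10 : pvScoreGet p ≥ 10
    · have : (PySem.Dict.mk [(">=10", a), ("8-9", b), ("6-7", c)]).modify ">=10" 0 (· + 1)
          = PySem.Dict.mk [(">=10", a + 1), ("8-9", b), ("6-7", c)] := by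
        simp [PySem.Dict.modify, PySem.Dict.contains, PySem.Dict.insert, PySem.Dict.getD,
          PySem.Dict.get?]
      simp only [if_pos h10, this, ih]
      have : ¬ (8 ≤ pvScoreGet p ∧ pvScoreGet p < 10) := by omega
      simp only [decide_eq_true_eq, if_pos h10, if_neg this,
        if_neg (show ¬ pvScoreGet p < 8 by omega), List.length_cons]
      simp only [List.cons.injEq, Prod.mk.injEq, and_true, true_and]
      push_cast; ring
    · by_cases h8 : pvScoreGet p ≥ 8
      · have : (PySem.Dict.mk [(">=10", a), ("8-9", b), ("6-7", c)]).modify "8-9" 0 (· + 1)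
            = PySem.Dict.mk [(">=10", a), ("8-9", b + 1), ("6-7", c)] := by
          simp [PySem.Dict.modify, PySem.Dict.contains, PySem.Dict.insert, PySem.Dict.getD,
            PySem.Dict.get?]
        simp only [if_neg h10, if_pos h8, this, ih]
        have h89 : (8 ≤ pvScoreGet p ∧ pvScoreGet p < 10) := by omega
        simp only [decide_eq_true_eq, if_neg h10, if_pos h89,
          if_neg (show ¬ pvScoreGet p < 8 by omega), List.length_cons]
        simp only [List.cons.injEq, Prod.mk.injEq, and_true, true_and]
        push_cast; ring
      · have : (PySem.Dict.mk [(">=10", a), ("8-9", b), ("6-7", c)]).modify "6-7" 0 (· + 1)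
            = PySem.Dict.mk [(">=10", a), ("8-9", b), ("6-7", c + 1)] := by
          simp [PySem.Dict.modify, PySem.Dict.contains, PySem.Dict.insert, PySem.Dict.getD,
            PySem.Dict.get?]
        simp only [if_neg h10, if_neg h8, this, ih]
        have : ¬ (8 ≤ pvScoreGet p ∧ pvScoreGet p < 10) := by omega
        simp only [decide_eq_true_eq, if_neg h10, if_neg this,
          if_pos (show pvScoreGet p < 8 by omega), List.length_cons]
        simp only [List.cons.injEq, Prod.mk.injEq, and_true, true_and]
        push_cast; ring

-- ===== VERDICT (by name: the statement is the Claim_ definition above) =====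
theorem score_distribution_py_spec : Claim_equal_score_distribution_py := by
  intro paths _
  unfold Spec_score_distribution_py score_distribution_py score_distribution_py_alt
  rw [score_loop_invariant]
  simp
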